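-- pv_equiv track=rewrite | github.com/JGhub-dev/Assignments | Week 2 Assignment using Python/9_count_zeros_sorted_matrix.py | countZeros
-- ===== SOURCE A (Python) =====
-- def countZeros(matrix, n):
--     count = 0
--     for row in matrix:
--         for val in reversed(row):
--             if val == 0:
--                 count += 1
--             else:
--                 break
--     return count
-- ===== SOURCE B (Python) =====
-- def countZeros(matrix, n):
--     total = 0
--     for row in matrix:
--         last = -1
--         for i, v in enumerate(row):
--             if v != 0:
--                 last = i
--         total += len(row) - 1 - last
--     return total
-- ===== Notes on version B (the rewrite author's own statement) =====
-- stated objective: alternative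
-- what changed: B replaces A's reversed per-row scan with early break by a single forward pass that tracks the index of the last nonzero element and adds len(row)-1-last in closed form.
import Mathlib
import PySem

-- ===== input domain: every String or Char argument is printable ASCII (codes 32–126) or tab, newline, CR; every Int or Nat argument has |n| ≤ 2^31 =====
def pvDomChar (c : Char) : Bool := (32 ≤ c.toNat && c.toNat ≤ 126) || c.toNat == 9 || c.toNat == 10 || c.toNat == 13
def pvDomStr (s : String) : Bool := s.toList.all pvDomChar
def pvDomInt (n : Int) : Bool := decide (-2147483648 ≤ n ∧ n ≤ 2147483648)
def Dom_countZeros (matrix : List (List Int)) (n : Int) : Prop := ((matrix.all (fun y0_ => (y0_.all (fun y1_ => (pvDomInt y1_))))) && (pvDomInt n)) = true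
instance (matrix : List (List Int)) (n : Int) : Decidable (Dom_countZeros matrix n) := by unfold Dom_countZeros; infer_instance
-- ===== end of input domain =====

-- B replaces A's reversed per-row scan (break at the first nonzero) by a forward pass
-- tracking the last nonzero index; same return value, alternative traversal (not claimed faster).

-- ===== PORT A =====
-- inner loop: 'for val in reversed(row): if val == 0: count += 1 else: break'
def pvTrail : List Int → Int
  | [] => 0
  | v :: rest => if v = 0 then 1 + pvTrail rest else 0

def countZeros (matrix : List (List Int)) (_n : Int) : Int :=
  matrix.foldl (fun count row => count + pvTrail row.reverse) 0

-- ===== PORT B =====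
-- inner loop: 'for i, v in enumerate(row): if v != 0: last = i'
def pvLastNZ : List Int → Int → Int → Int
  | [], _, last => last
  | v :: rest, i, last => pvLastNZ rest (i + 1) (if v ≠ 0 then i else last)

def countZeros_alt (matrix : List (List Int)) (_n : Int) : Int :=
  matrix.foldl (fun total row => total + ((row.length : Int) - 1 - pvLastNZ row 0 (-1))) 0

-- ===== PRECONDITION & SPEC =====
def Spec_countZeros (matrix : List (List Int)) (n : Int) (out : Int) : Prop := out = countZeros_alt matrix n
instance (matrix : List (List Int)) (n : Int) (out : Int) : Decidable (Spec_countZeros matrix n out) := by unfold Spec_countZeros; infer_instance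

-- ===== CLAIM (what is proved, stated in full; the proofs are below) =====
def Claim_equal_countZeros : Prop := ∀ (matrix : List (List Int)) (n : Int), Dom_countZeros matrix n → Spec_countZeros matrix n (countZeros matrix n)

-- ===== LEMMAS AND PROOFS =====

theorem pvLastNZ_snoc (l : List Int) (x : Int) : ∀ (i last : Int),
    pvLastNZ (l ++ [x]) i last = if x ≠ 0 then i + l.length else pvLastNZ l i last := by
  induction l with
  | nil => intro i last; simp [pvLastNZ]
  | cons v rest ih =>
      intro i last
      simp only [List.cons_append, pvLastNZ, ih, List.length_cons]
      split_ifs <;> omega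

theorem pvRow_eq (row : List Int) :
    pvTrail row.reverse = (row.length : Int) - 1 - pvLastNZ row 0 (-1) := by
  induction row using List.reverseRecOn with
  | nil => simp [pvTrail, pvLastNZ]
  | append_singleton l x ih =>
      rw [List.reverse_append]
      simp only [List.reverse_singleton, List.singleton_append, pvTrail, pvLastNZ_snoc,
        List.length_append, List.length_singleton]
      by_cases hx : x = 0
      · simp only [hx, ne_eq, not_true_eq_false, if_false, ih]; push_cast; omega
      · simp only [hx, ne_eq, not_false_eq_true, if_true]; push_cast; omega

theorem pvFold_eq (matrix : List (List Int)) : ∀ (c : Int),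
    matrix.foldl (fun count row => count + pvTrail row.reverse) c
      = matrix.foldl (fun total row => total + ((row.length : Int) - 1 - pvLastNZ row 0 (-1))) c := by
  induction matrix with
  | nil => intro c; rfl
  | cons row rest ih => intro c; rw [List.foldl_cons, List.foldl_cons, pvRow_eq, ih]

-- ===== VERDICT (by name: the statement is the Claim_ definition above) =====
theorem countZeros_spec : Claim_equal_countZeros := by
  intro matrix n _
  unfold Spec_countZeros countZeros countZeros_alt
  exact pvFold_eq matrix 0
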